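-- pv_equiv track=rewrite | github.com/pypi-data/pypi-mirror-390 | packages/cifparse/cifparse-2.0.9-py3-none-any.whl/cifparse/functions/records.py | split_lines_by_char
-- ===== SOURCE A (Python) =====
-- def split_lines_by_char(lines: list[str], field_indices: tuple) -> dict:
--     result = {}
--     start, end = field_indices
--     for line in lines:
--         key = line[start:end].upper()
--         if key not in result:
--             result[key] = []
--         result[key].append(line)
--     return result
-- ===== SOURCE B (Python) =====
-- def split_lines_by_char(lines: list[str], field_indices: tuple) -> dict:
--     start, end = field_indices
--     keys = [line[start:end].upper() for line in lines]
--     return {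
--         k: [line for line, kk in zip(lines, keys) if kk == k]
--         for k in dict.fromkeys(keys)
--     }
-- ===== Notes on version B (the rewrite author's own statement) =====
-- stated objective: simpler
-- what changed: Replaces the single-pass dict accumulation (insert-empty-then-append per line) with a two-phase strategy: compute all keys once, deduplicate them preserving first occurrence (dict.fromkeys), then build each group by filtering the lines for that key.
import Mathlib
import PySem

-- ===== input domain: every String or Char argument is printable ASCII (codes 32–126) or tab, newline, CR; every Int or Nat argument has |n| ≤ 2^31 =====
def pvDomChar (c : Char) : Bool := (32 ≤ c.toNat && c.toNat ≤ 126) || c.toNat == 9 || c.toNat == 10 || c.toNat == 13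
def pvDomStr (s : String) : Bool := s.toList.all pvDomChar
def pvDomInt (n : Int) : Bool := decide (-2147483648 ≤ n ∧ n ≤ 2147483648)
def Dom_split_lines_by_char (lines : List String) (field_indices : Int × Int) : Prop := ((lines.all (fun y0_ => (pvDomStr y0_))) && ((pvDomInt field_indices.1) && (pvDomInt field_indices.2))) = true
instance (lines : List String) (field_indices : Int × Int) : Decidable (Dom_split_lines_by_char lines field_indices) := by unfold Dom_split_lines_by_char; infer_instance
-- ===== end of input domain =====

-- B is a simpler decomposition: it deduplicates the key list once and builds each group by
-- filtering the lines, instead of A's one-pass dict accumulation (insert-empty-then-append).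

-- shared helper: line[start:end].upper()
def keyOf (field_indices : Int × Int) (line : String) : String :=
  PySem.Str.upper (PySem.Str.slice line (some field_indices.1) (some field_indices.2))

-- ===== PORT A =====
def split_lines_by_char (lines : List String) (field_indices : Int × Int) : List (String × List String) :=
  (lines.foldl
    (fun result line =>
      let key := keyOf field_indices line
      let result := if result.contains key then result else result.insert key ([] : List String)
      result.modify key [] (fun v => v ++ [line]))
    (PySem.Dict.empty : PySem.Dict String (List String))).items

-- ===== PORT B =====
def split_lines_by_char_alt (lines : List String) (field_indices : Int × Int) : List (String × List String) :=
  let keys := lines.map (keyOf field_indices)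
  (PySem.List.dedup keys).map
    (fun k => (k, ((lines.zip keys).filter (fun p => p.2 == k)).map Prod.fst))

-- ===== PRECONDITION & SPEC =====
def Spec_split_lines_by_char (lines : List String) (field_indices : Int × Int) (out : List (String × List String)) : Prop := out = split_lines_by_char_alt lines field_indices
instance (lines : List String) (field_indices : Int × Int) (out : List (String × List String)) : Decidable (Spec_split_lines_by_char lines field_indices out) := by unfold Spec_split_lines_by_char; infer_instance

-- ===== CLAIM (what is proved, stated in full; the proofs are below) =====
def Claim_equal_split_lines_by_char : Prop := ∀ (lines : List String) (field_indices : Int × Int), Dom_split_lines_by_char lines field_indices → Spec_split_lines_by_char lines field_indices (split_lines_by_char lines field_indices)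

-- ===== LEMMAS AND PROOFS =====

-- A's loop body (insert [] if the key is absent, then append the line) is a single
-- 'modify key [] (· ++ [line])': inserting [] first does not change the looked-up default.
lemma stepA_eq_modify (d : PySem.Dict String (List String)) (k line : String) :
    (if d.contains k then d else d.insert k ([] : List String)).modify k [] (fun v => v ++ [line])
      = d.modify k [] (fun v => v ++ [line]) := by
  by_cases h : d.contains k
  · simp [h]
  · have hg : d.getD k [] = [] :=
      PySem.Dict.getD_of_not_contains d [] (by simpa using h)
    simp [h, PySem.Dict.modify, PySem.Dict.insert_insert_self, PySem.Dict.getD_insert_self, hg]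

theorem split_lines_by_char_main (lines : List String) (fi : Int × Int) :
    split_lines_by_char lines fi = split_lines_by_char_alt lines fi := by
  unfold split_lines_by_char split_lines_by_char_alt
  have hstep :
      lines.foldl
        (fun result line =>
          let key := keyOf fi line
          let result := if result.contains key then result else result.insert key ([] : List String)
          result.modify key [] (fun v => v ++ [line]))
        (PySem.Dict.empty : PySem.Dict String (List String))
      = lines.foldl (fun d line => d.modify (keyOf fi line) [] (fun v => v ++ [line]))
          (PySem.Dict.empty : PySem.Dict String (List String)) := by
    apply PySem.List.foldl_congr_mem
    intro acc x _
    exact stepA_eq_modify acc (keyOf fi x) x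
  rw [hstep]
  set F := lines.foldl (fun d line => d.modify (keyOf fi line) [] (fun v => v ++ [line]))
      (PySem.Dict.empty : PySem.Dict String (List String)) with hF
  have hnodup : F.keys.Nodup :=
    PySem.Dict.nodup_keys_foldl_modify_key lines (keyOf fi) [] (fun _ line v => v ++ [line])
      PySem.Dict.empty (by simp)
  have hkeys : F.keys = PySem.Set.ofList (lines.map (keyOf fi)) := by
    have := PySem.Dict.keys_foldl_modify_key lines (keyOf fi) [] (fun _ line v => v ++ [line])
      (PySem.Dict.empty : PySem.Dict String (List String))
    simpa [PySem.Set.update, PySem.Set.ofList] using this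
  have hpairs : F = (lines.map (fun x => (keyOf fi x, x))).foldl
      (fun d p => d.modify p.1 [] (fun v => v ++ [p.2]))
      (PySem.Dict.empty : PySem.Dict String (List String)) := by
    rw [List.foldl_map]
  have hget : ∀ k : String, F.getD k [] = (lines.filter (fun x => keyOf fi x == k)) := by
    intro k
    rw [hpairs, PySem.Dict.getD_foldl_modify_append]
    simp [List.filter_map, List.map_map, Function.comp_def]
  have hz : lines.zip (lines.map (keyOf fi)) = lines.map (fun a => (a, keyOf fi a)) := by
    simpa using (List.zip_map' (f := id) (g := keyOf fi) (l := lines))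
  rw [PySem.Dict.items_eq_map_keys F hnodup [], hkeys]
  simp only [PySem.List.dedup_eq_ofList]
  apply List.map_congr_left
  intro k _
  rw [hget k, hz]
  simp [List.filter_map, List.map_map, Function.comp_def]

-- ===== VERDICT (by name: the statement is the Claim_ definition above) =====
theorem split_lines_by_char_spec : Claim_equal_split_lines_by_char := by
  intro lines fi _
  exact split_lines_by_char_main lines fi
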